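-- pv_equiv track=rewrite | github.com/EyeDeck/Advent-of-Code | AoC2019/d4.py | get_next_ascending
-- ===== SOURCE A (Python) =====
-- def get_next_ascending(num):
--     s = str(num)
--     ln = len(s)
--     ints = [int(i) for i in s]
--     for i in range(0, ln-1):
--         if ints[i] > ints[i+1]:
--             return int(''.join(s[:i] + s[i]*(ln-i)))
--     return num
-- ===== SOURCE B (Python) =====
-- def get_next_ascending(num):
--     s = str(num)
--     out = []
--     for c in reversed(s):
--         if out and c > out[0]:
--             out = [c] * (len(out) + 1)
--         else:
--             out = [c] + out
--     t = ''.join(out)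
--     return num if t == s else int(t)
-- ===== Notes on version B (the rewrite author's own statement) =====
-- stated objective: alternative
-- what changed: A scans digit indices left-to-right and on the first descent returns int of a slice + repeated-character fill; B instead makes one right-to-left fold over the characters, rebuilding the fixed-up string with an overwrite rule (on a descent the whole suffix built so far is replaced by copies of the larger digit) and re-parses it only if it changed.
import Mathlib
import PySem

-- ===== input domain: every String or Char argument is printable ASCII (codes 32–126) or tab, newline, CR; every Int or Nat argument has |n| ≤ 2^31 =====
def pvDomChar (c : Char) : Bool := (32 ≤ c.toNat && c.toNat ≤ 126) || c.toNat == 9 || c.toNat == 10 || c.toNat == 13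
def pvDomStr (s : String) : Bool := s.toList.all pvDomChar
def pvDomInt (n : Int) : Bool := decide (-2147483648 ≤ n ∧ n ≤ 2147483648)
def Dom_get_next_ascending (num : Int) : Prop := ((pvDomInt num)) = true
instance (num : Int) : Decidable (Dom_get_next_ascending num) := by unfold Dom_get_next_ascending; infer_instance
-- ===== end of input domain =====

-- B re-implements A's leftmost-descent fill as a single right-to-left fold over the digit
-- characters (alternative structure, same exact values); equivalence proved for num ≥ 0,
-- where A returns (A raises ValueError on negative num: int('-')).

-- ===== PORT A =====
-- the 'for i in range(0, ln-1): if ints[i] > ints[i+1]: return int(...)' loop, as structural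
-- recursion over the index list; 'some r' = early return, 'none' = loop fell through
def pvALoop (s : List Char) (ints : List Int) (ln : Int) : List Int → Option Int
  | [] => none
  | i :: rest =>
    if PySem.List.pyGetD ints i 0 > PySem.List.pyGetD ints (i + 1) 0 then
      -- int(''.join(s[:i] + s[i]*(ln-i))); i ∈ range(0, ln-1) so s[i] is in range (pyGetD exact)
      some ((PySem.Int.ofChars? (PySem.List.slice s none (some i) ++
              List.replicate (ln - i).toNat (PySem.List.pyGetD s i ' '))).getD 0)
    else pvALoop s ints ln rest

def get_next_ascending (num : Int) : Int :=
  let s := PySem.Int.toChars num                     -- s = str(num)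
  let ln : Int := PySem.List.len s                   -- ln = len(s)
  -- ints = [int(i) for i in s]; under Pre_ (num ≥ 0) every char is a digit, so int() never
  -- raises and .getD 0 is exact (num < 0, where int('-') raises ValueError, is outside Pre_)
  let ints : List Int := s.map (fun c => (PySem.Int.ofChars? [c]).getD 0)
  match pvALoop s ints ln (PySem.List.pyRange 0 (ln - 1) 1) with
  | some r => r
  | none => num

-- ===== PORT B =====
def get_next_ascending_alt (num : Int) : Int :=
  let s := PySem.Int.toChars num                     -- s = str(num)
  -- for c in reversed(s): if out and c > out[0]: out = [c]*(len(out)+1) else: out = [c] + out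
  let out := s.reverse.foldl (fun out c =>
      match out with
      | [] => [c] ++ []                              -- 'out' falsy: out = [c] + out
      | h :: _ => if h < c then List.replicate (out.length + 1) c else [c] ++ out) []
  let t := out                                       -- t = ''.join(out)
  -- return num if t == s else int(t); when t ≠ s, t is a nonempty digit string so int() is exact
  if t = s then num else (PySem.Int.ofChars? t).getD 0

-- ===== PRECONDITION & SPEC =====
-- Pre_ excludes exactly num < 0: there str(num) starts with '-' and A's int(i) on that
-- one-character string raises ValueError.
def Pre_get_next_ascending (num : Int) : Prop := 0 ≤ num
instance (num : Int) : Decidable (Pre_get_next_ascending num) := by unfold Pre_get_next_ascending; infer_instance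
def pvWitness_get_next_ascending : Int := 1320

def Spec_get_next_ascending (num : Int) (out : Int) : Prop := out = get_next_ascending_alt num
instance (num : Int) (out : Int) : Decidable (Spec_get_next_ascending num out) := by unfold Spec_get_next_ascending; infer_instance

-- ===== CLAIM (what is proved, stated in full; the proofs are below) =====
def Claim_equal_get_next_ascending : Prop := ∀ (num : Int), Dom_get_next_ascending num → Pre_get_next_ascending num → Spec_get_next_ascending num (get_next_ascending num)

-- ===== LEMMAS AND PROOFS =====

-- the common spec of both loops: fill everything from the leftmost adjacent descent with that digit
def pvFix : List Char → List Char
  | [] => []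
  | c :: rest =>
    match rest with
    | [] => [c]
    | d :: _ => if d < c then List.replicate (rest.length + 1) c else c :: pvFix rest

theorem pvFix_length (l : List Char) : (pvFix l).length = l.length := by
  induction l with
  | nil => rfl
  | cons c rest ih =>
    cases rest with
    | nil => rfl
    | cons d t =>
      simp only [pvFix] at *
      split <;> simp_all

theorem pvFix_head? (l : List Char) : (pvFix l).head? = l.head? := by
  cases l with
  | nil => rfl
  | cons c rest =>
    cases rest with
    | nil => rfl
    | cons d t => simp only [pvFix]; split <;> simp [List.replicate_succ]

theorem pvFoldr_eq_fix (s : List Char) :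
    s.foldr (fun c out =>
      match out with
      | [] => [c] ++ []
      | h :: _ => if h < c then List.replicate (out.length + 1) c else [c] ++ out) [] = pvFix s := by
  induction s with
  | nil => rfl
  | cons c rest ih =>
    simp only [List.foldr_cons, ih]
    cases rest with
    | nil => rfl
    | cons d t =>
      have hh := pvFix_head? (d :: t)
      have hl := pvFix_length (d :: t)
      simp only [List.head?_cons] at hh
      cases hfix : pvFix (d :: t) with
      | nil => simp [hfix] at hh
      | cons h u =>
        rw [hfix] at hh hl
        simp only [List.head?_cons, Option.some.injEq] at hh
        subst hh
        simp only [pvFix, List.length_cons]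
        simp only [List.length_cons] at hl
        split
        · simp [hl]
        · simpa using hfix.symm

-- value of a single digit char: int(c) = code(c) - 48
theorem pvDigitVal (c : Char) (h : c.isDigit) :
    PySem.Int.ofChars? [c] = some ((c.toNat : Int) - 48) := by
  have h10 : c = '0' ∨ c = '1' ∨ c = '2' ∨ c = '3' ∨ c = '4' ∨ c = '5' ∨ c = '6' ∨ c = '7' ∨ c = '8' ∨ c = '9' := by
    simp only [Char.isDigit, Bool.and_eq_true, decide_eq_true_eq, UInt32.le_iff_toNat_le] at h
    simp only [Char.ext_iff, ← UInt32.toNat_inj]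
    simp only [show ('0').val.toNat = 48 from rfl, show ('1').val.toNat = 49 from rfl,
      show ('2').val.toNat = 50 from rfl, show ('3').val.toNat = 51 from rfl,
      show ('4').val.toNat = 52 from rfl, show ('5').val.toNat = 53 from rfl,
      show ('6').val.toNat = 54 from rfl, show ('7').val.toNat = 55 from rfl,
      show ('8').val.toNat = 56 from rfl, show ('9').val.toNat = 57 from rfl] at h ⊢
    omega
  rcases h10 with h|h|h|h|h|h|h|h|h|h <;> subst h <;> decide

-- A's guard on the int values is the char-order test B uses
theorem pvValGuard (a b : Char) :
    ((a.toNat : Int) - 48 > (b.toNat : Int) - 48) ↔ b < a := by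
  rw [Char.lt_def, UInt32.lt_iff_toNat_lt]
  simp only [Char.toNat]
  omega

-- A's loop from index j, characterized against pvFix of the suffix s.drop j
theorem pvALoop_spec (s : List Char) (n j : Nat) (hn : s.length - j = n) (hj : j < s.length) :
    pvALoop s (s.map (fun c => (c.toNat : Int) - 48)) (s.length)
        (PySem.List.pyRange (j : Int) ((s.length : Int) - 1) 1) =
      (if pvFix (s.drop j) = s.drop j then none
       else some ((PySem.Int.ofChars? (s.take j ++ pvFix (s.drop j))).getD 0)) := by
  induction n using Nat.strong_induction_on generalizing j with
  | _ n ih =>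
  have hdropj := List.drop_eq_getElem_cons hj
  by_cases hlast : j + 1 < s.length
  · -- j < len - 1 : the range is nonempty
    rw [PySem.List.pyRange_one_cons (by omega)]
    have hdropj1 := List.drop_eq_getElem_cons hlast
    simp only [pvALoop]
    have hget : ∀ (k : Nat) (hk : k < s.length),
        PySem.List.pyGetD (s.map (fun c => (c.toNat : Int) - 48)) (k : Int) 0 = (s[k].toNat : Int) - 48 := by
      intro k hk
      rw [PySem.List.pyGetD_natCast, List.getD_eq_getElem _ _ (by simpa using hk), List.getElem_map]
    have hcast1 : ((j : Int) + 1) = ((j + 1 : Nat) : Int) := by push_cast; ring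
    rw [hcast1, hget j hj, hget (j+1) hlast]
    by_cases hdesc : s[j+1] < s[j]
    · -- descent at j: A returns here; pvFix (drop j) is the constant fill
      rw [if_pos ((pvValGuard _ _).mpr hdesc)]
      have hfixd : pvFix (s.drop j) = List.replicate (s.length - j) s[j] := by
        rw [hdropj, hdropj1, pvFix]
        simp only [if_pos hdesc, List.length_cons, List.length_drop]
        congr 1
        omega
      have hne : pvFix (s.drop j) ≠ s.drop j := by
        intro heq
        rw [hfixd, hdropj, hdropj1] at heq
        have h1 := congrArg (fun l => l[1]?) heq
        simp only [List.getElem?_replicate, List.getElem?_cons_succ, List.getElem?_cons_zero] at h1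
        rw [if_pos (by omega)] at h1
        simp only [Option.some.injEq] at h1
        exact absurd hdesc (by rw [h1]; exact lt_irrefl _)
      have hsj : PySem.List.pyGetD s (j : Int) ' ' = s[j] := by
        rw [PySem.List.pyGetD_natCast, List.getD_eq_getElem _ _ hj]
      have hcount : (((s.length : Int)) - (j : Int)).toNat = s.length - j := by omega
      rw [PySem.List.slice_to_natCast, hsj, hcount, ← hfixd, if_neg hne]
    · -- no descent at j: loop continues; pvFix walks past s[j]
      rw [if_neg (by rw [pvValGuard]; exact hdesc)]
      have hfixstep : pvFix (s.drop j) = s[j] :: pvFix (s.drop (j + 1)) := by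
        rw [hdropj, hdropj1, pvFix]
        simp only [if_neg hdesc, ← hdropj1]
      have htake : s.take (j + 1) = s.take j ++ [s[j]] := by
        rw [List.take_add_one]
        simp [List.getElem?_eq_getElem hj]
      rw [ih (s.length - (j+1)) (by omega) (j+1) rfl hlast]
      rw [hfixstep, hdropj]
      by_cases hrec : pvFix (s.drop (j + 1)) = s.drop (j + 1)
      · simp [hrec]
      · rw [if_neg hrec, if_neg (by simp only [List.cons.injEq]; intro h; exact hrec h.2)]
        rw [htake, List.append_assoc]
        rfl
  · -- j = len - 1 : empty range, singleton suffix
    rw [PySem.List.pyRange_one_eq_nil (by omega)]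
    have hdrop1 : s.drop (j + 1) = [] := List.drop_eq_nil_iff.mpr (by omega)
    rw [hdropj, hdrop1, pvALoop, pvFix]
    simp

-- ===== VERDICT (by name: the statement is the Claim_ definition above) =====
theorem get_next_ascending_spec : Claim_equal_get_next_ascending := by
  intro num _hdom hpre
  have hpre' : (0 : Int) ≤ num := hpre
  unfold Spec_get_next_ascending get_next_ascending get_next_ascending_alt
  have hs : PySem.Int.toChars num = Nat.toDigits 10 num.toNat := by
    unfold PySem.Int.toChars
    rw [if_neg (by omega)]
  set s : List Char := PySem.Int.toChars num with hsdef
  have hdig : ∀ c ∈ s, c.isDigit := by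
    intro c hc
    rw [hs] at hc
    exact Nat.isDigit_of_mem_toDigits (by norm_num) (le_refl 10) hc
  have hlen : 0 < s.length := by rw [hs]; exact Nat.length_toDigits_pos
  have hints : s.map (fun c => (PySem.Int.ofChars? [c]).getD 0) = s.map (fun c => (c.toNat : Int) - 48) := by
    apply List.map_congr_left
    intro c hc
    rw [pvDigitVal c (hdig c hc)]
    rfl
  have hmain := pvALoop_spec s s.length 0 (by omega) hlen
  simp only [Nat.cast_zero, List.drop_zero, List.take_zero, List.nil_append] at hmain
  simp only [hints, List.foldl_reverse, PySem.List.len_eq, hmain, pvFoldr_eq_fix]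
  by_cases hfix : pvFix s = s
  · simp [hfix]
  · simp [hfix]
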